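-- pv_equiv track=rewrite | github.com/miya256/atcoder_lib_py | algorithm/number_theory/baby_step_giant_step.py | mapping_pow
-- ===== SOURCE A (Python) =====
-- def mapping_pow(f,m,mod): #f = [a,b] = ax+b
--     id = [1,0]
--     while m:
--         if m & 1:
--             id = [(id[0]*f[0]) % mod, (id[0]*f[1]+id[1]) % mod]
--         f = [(f[0]*f[0]) % mod, (f[0]*f[1]+f[1]) % mod]
--         m >>= 1
--     return id
-- ===== SOURCE B (Python) =====
-- def mapping_pow(f, m, mod):  # f = [a,b] = ax+b
--     if m == 0:
--         return [1, 0]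
--     half = mapping_pow([(f[0] * f[0]) % mod, (f[0] * f[1] + f[1]) % mod], m // 2, mod)
--     if m & 1:
--         return [(half[0] * f[0]) % mod, (half[0] * f[1] + half[1]) % mod]
--     return half
-- ===== Notes on version B (the rewrite author's own statement) =====
-- stated objective: alternative
-- what changed: Replaces A's iterative bit-scanning loop with an accumulator by a recursive exponentiation-by-squaring (f^m = (f^2)^(m//2) composed with f if m is odd), with no identity accumulator.
import Mathlib
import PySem

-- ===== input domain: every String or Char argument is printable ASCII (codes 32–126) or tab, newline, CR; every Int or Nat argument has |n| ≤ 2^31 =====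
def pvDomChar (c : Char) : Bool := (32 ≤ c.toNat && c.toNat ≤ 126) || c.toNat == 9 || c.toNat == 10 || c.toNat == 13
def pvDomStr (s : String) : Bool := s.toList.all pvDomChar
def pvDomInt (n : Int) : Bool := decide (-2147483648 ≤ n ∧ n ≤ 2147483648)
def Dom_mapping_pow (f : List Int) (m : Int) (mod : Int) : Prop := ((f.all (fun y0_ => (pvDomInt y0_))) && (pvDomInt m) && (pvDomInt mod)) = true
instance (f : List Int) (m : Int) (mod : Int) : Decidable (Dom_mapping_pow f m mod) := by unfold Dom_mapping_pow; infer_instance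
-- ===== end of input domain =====

-- B replaces A's iterative bit-scanning loop (identity accumulator, repeated squaring in place)
-- by a recursive exponentiation-by-squaring with no accumulator: same result, same O(log m) cost.


-- ===== PORT A =====
-- A's while-loop, as structural recursion on the nonnegative loop counter (Pre_ gives m ≥ 0;
-- for m < 0 Python A never terminates).  f[0]/f[1] are ported as getD _ 0: exact under Pre_
-- (Python raises IndexError on shorter lists, excluded by Pre_), and PySem.Int.mod = Python %.
def mappingLoopA (idv : List Int) (f : List Int) (mod : Int) (m : Nat) : List Int :=
  if m = 0 then idv
  else
    let idv' := if m % 2 = 1 then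
        [PySem.Int.mod ((idv.getD 0 0) * (f.getD 0 0)) mod,
         PySem.Int.mod ((idv.getD 0 0) * (f.getD 1 0) + (idv.getD 1 0)) mod]
      else idv
    mappingLoopA idv'
      [PySem.Int.mod ((f.getD 0 0) * (f.getD 0 0)) mod,
       PySem.Int.mod ((f.getD 0 0) * (f.getD 1 0) + (f.getD 1 0)) mod] mod (m / 2)
  decreasing_by exact Nat.div_lt_self (Nat.pos_of_ne_zero (by assumption)) (by omega)

def mapping_pow (f : List Int) (m : Int) (mod : Int) : List Int :=
  mappingLoopA [1, 0] f mod m.toNat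

-- ===== PORT B =====
-- B's recursion (Source B), on the same nonnegative counter; m // 2 on m ≥ 0 is Nat division.
def mappingPowB (f : List Int) (mod : Int) (m : Nat) : List Int :=
  if m = 0 then [1, 0]
  else
    let half := mappingPowB
      [PySem.Int.mod ((f.getD 0 0) * (f.getD 0 0)) mod,
       PySem.Int.mod ((f.getD 0 0) * (f.getD 1 0) + (f.getD 1 0)) mod] mod (m / 2)
    if m % 2 = 1 then
      [PySem.Int.mod ((half.getD 0 0) * (f.getD 0 0)) mod,
       PySem.Int.mod ((half.getD 0 0) * (f.getD 1 0) + (half.getD 1 0)) mod]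
    else half
  decreasing_by exact Nat.div_lt_self (Nat.pos_of_ne_zero (by assumption)) (by omega)

def mapping_pow_alt (f : List Int) (m : Int) (mod : Int) : List Int :=
  mappingPowB f mod m.toNat

-- ===== PRECONDITION & SPEC =====
-- Pre_ excludes exactly the inputs where Python A returns no value: m < 0 (the loop never
-- terminates: m >>= 1 keeps negative m negative), and m ≠ 0 with len(f) < 2 (IndexError)
-- or mod = 0 (ZeroDivisionError).  Python B raises/diverges on the same inputs.
def Pre_mapping_pow (f : List Int) (m : Int) (mod : Int) : Prop :=
  0 ≤ m ∧ (m ≠ 0 → 2 ≤ f.length ∧ mod ≠ 0)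
instance (f : List Int) (m : Int) (mod : Int) : Decidable (Pre_mapping_pow f m mod) := by
  unfold Pre_mapping_pow; infer_instance

def pvWitness_mapping_pow : List Int × Int × Int := ([2, 3], 5, 7)

def Spec_mapping_pow (f : List Int) (m : Int) (mod : Int) (out : List Int) : Prop := out = mapping_pow_alt f m mod
instance (f : List Int) (m : Int) (mod : Int) (out : List Int) : Decidable (Spec_mapping_pow f m mod out) := by unfold Spec_mapping_pow; infer_instance

-- ===== CLAIM (what is proved, stated in full; the proofs are below) =====
def Claim_equal_mapping_pow : Prop := ∀ (f : List Int) (m : Int) (mod : Int), Dom_mapping_pow f m mod → Pre_mapping_pow f m mod → Spec_mapping_pow f m mod (mapping_pow f m mod)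

-- ===== LEMMAS AND PROOFS =====

-- Mathematical model: affine maps as pairs, composition, iterated composition.
def affComp (p q : Int × Int) : Int × Int := (p.1 * q.1, p.1 * q.2 + p.2)

def affPow (f : Int × Int) : Nat → Int × Int
  | 0 => (1, 0)
  | n + 1 => affComp (affPow f n) f

-- congruence mod n, and componentwise reduction
def MEq (n a b : Int) : Prop := n ∣ b - a

def PEq (n : Int) (p q : Int × Int) : Prop := MEq n p.1 q.1 ∧ MEq n p.2 q.2

def rmodP (n : Int) (p : Int × Int) : Int × Int := (p.1.fmod n, p.2.fmod n)

def tpL (l : List Int) : Int × Int := (l.getD 0 0, l.getD 1 0)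

def rmodL (n : Int) (p : Int × Int) : List Int := [p.1.fmod n, p.2.fmod n]

theorem MEq.refl (n a : Int) : MEq n a a := by simp [MEq]

theorem MEq.mul {n a a' b b' : Int} (h1 : MEq n a a') (h2 : MEq n b b') :
    MEq n (a * b) (a' * b') := by
  obtain ⟨k, hk⟩ := h1; obtain ⟨l, hl⟩ := h2
  exact ⟨a' * l + k * b, by linear_combination a' * hl + b * hk⟩

theorem MEq.add {n a a' b b' : Int} (h1 : MEq n a a') (h2 : MEq n b b') :
    MEq n (a + b) (a' + b') := by
  obtain ⟨k, hk⟩ := h1; obtain ⟨l, hl⟩ := h2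
  exact ⟨k + l, by linarith⟩

theorem MEq.fmod_self (n a : Int) : MEq n (a.fmod n) a := by
  exact ⟨a.fdiv n, by have := Int.fmod_add_mul_fdiv a n; linarith⟩

theorem fmod_congr {n a b : Int} (h : MEq n a b) : a.fmod n = b.fmod n := by
  obtain ⟨k, hk⟩ := h
  have hb : b = a + n * k := by linarith
  subst hb
  rw [Int.fmod_eq_emod, Int.fmod_eq_emod]
  have hd : n ∣ a + n * k ↔ n ∣ a :=
    ⟨fun h => by simpa using h.sub (dvd_mul_right n k), fun h => h.add (dvd_mul_right n k)⟩
  rw [Int.add_mul_emod_self_left]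
  simp [hd]

theorem PEq.refl (n : Int) (p : Int × Int) : PEq n p p := ⟨MEq.refl n p.1, MEq.refl n p.2⟩

theorem PEq.trans {n : Int} {p q r : Int × Int} (h1 : PEq n p q) (h2 : PEq n q r) :
    PEq n p r := by
  obtain ⟨⟨k, hk⟩, ⟨l, hl⟩⟩ := h1; obtain ⟨⟨k', hk'⟩, ⟨l', hl'⟩⟩ := h2
  exact ⟨⟨k + k', by linarith⟩, ⟨l + l', by linarith⟩⟩

theorem PEq.comp {n : Int} {p p' q q' : Int × Int} (h1 : PEq n p p') (h2 : PEq n q q') :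
    PEq n (affComp p q) (affComp p' q') :=
  ⟨h1.1.mul h2.1, (h1.1.mul h2.2).add h1.2⟩

theorem PEq.rmod_self (n : Int) (p : Int × Int) : PEq n (rmodP n p) p :=
  ⟨MEq.fmod_self n p.1, MEq.fmod_self n p.2⟩

theorem rmodL_congr {n : Int} {p q : Int × Int} (h : PEq n p q) : rmodL n p = rmodL n q := by
  simp [rmodL, fmod_congr h.1, fmod_congr h.2]

theorem affPow_congr {n : Int} {f f' : Int × Int} (h : PEq n f f') (k : Nat) :
    PEq n (affPow f k) (affPow f' k) := by
  induction k with
  | zero => exact PEq.refl n (1, 0)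
  | succ k ih => exact ih.comp h

theorem affComp_assoc (p q r : Int × Int) :
    affComp (affComp p q) r = affComp p (affComp q r) := by
  simp [affComp]; constructor <;> ring

theorem affPow_sq (f : Int × Int) (k : Nat) :
    affPow (affComp f f) k = affPow f (2 * k) := by
  induction k with
  | zero => rfl
  | succ k ih =>
    rw [affPow, ih, ← affComp_assoc]
    have h : 2 * (k + 1) = 2 * k + 1 + 1 := by omega
    rw [h]; rfl

theorem affComp_affPow (f : Int × Int) (k : Nat) :
    affComp f (affPow f k) = affPow f (k + 1) := by
  induction k with
  | zero => simp [affPow, affComp]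
  | succ k ih =>
    calc affComp f (affPow f (k + 1)) = affComp f (affComp (affPow f k) f) := rfl
    _ = affComp (affComp f (affPow f k)) f := (affComp_assoc _ _ _).symm
    _ = affComp (affPow f (k + 1)) f := by rw [ih]
    _ = affPow f (k + 1 + 1) := rfl

-- the squaring and composition steps of both ports, as list literals
theorem step_list (mod : Int) (h f : List Int) :
    [PySem.Int.mod ((h.getD 0 0) * (f.getD 0 0)) mod,
     PySem.Int.mod ((h.getD 0 0) * (f.getD 1 0) + (h.getD 1 0)) mod]
      = rmodL mod (affComp (tpL h) (tpL f)) := by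
  simp [rmodL, affComp, tpL, PySem.Int.mod]

theorem tpL_sq (f : List Int) (mod : Int) :
    tpL [PySem.Int.mod ((f.getD 0 0) * (f.getD 0 0)) mod,
         PySem.Int.mod ((f.getD 0 0) * (f.getD 1 0) + (f.getD 1 0)) mod]
      = rmodP mod (affComp (tpL f) (tpL f)) := by
  simp [tpL, rmodP, affComp, PySem.Int.mod]

theorem tpL_rmodL (n : Int) (p : Int × Int) : tpL (rmodL n p) = rmodP n p := by
  simp [tpL, rmodL, rmodP]

-- B's recursion computes the reduced m-th power (m > 0)
theorem mappingPowB_eq (mod : Int) (m : Nat) (hm : m ≠ 0) (f : List Int) :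
    mappingPowB f mod m = rmodL mod (affPow (tpL f) m) := by
  induction m using Nat.strong_induction_on generalizing f with
  | _ m ih =>
  rw [mappingPowB, if_neg hm]
  by_cases h2 : m / 2 = 0
  · have hm1 : m = 1 := by omega
    subst hm1
    rw [mappingPowB]
    simp [rmodL, affPow, affComp, tpL, PySem.Int.mod]
  · have hlt : m / 2 < m := Nat.div_lt_self (Nat.pos_of_ne_zero hm) (by omega)
    rw [ih (m / 2) hlt h2]
    have hsq : PEq mod (affPow (tpL [PySem.Int.mod ((f.getD 0 0) * (f.getD 0 0)) mod,
        PySem.Int.mod ((f.getD 0 0) * (f.getD 1 0) + (f.getD 1 0)) mod]) (m / 2))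
        (affPow (tpL f) (2 * (m / 2))) := by
      rw [tpL_sq, ← affPow_sq]
      exact affPow_congr (PEq.rmod_self mod _) (m / 2)
    by_cases hodd : m % 2 = 1
    · rw [if_pos hodd, step_list]
      apply rmodL_congr
      rw [tpL_rmodL]
      have hc := PEq.comp ((PEq.rmod_self mod _).trans hsq) (PEq.refl mod (tpL f))
      have hpow : affComp (affPow (tpL f) (2 * (m / 2))) (tpL f) = affPow (tpL f) m := by
        have h : m = 2 * (m / 2) + 1 := by omega
        conv_rhs => rw [h, affPow]
      rw [← hpow]; exact hc
    · rw [if_neg hodd]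
      apply rmodL_congr
      have hm2 : 2 * (m / 2) = m := by omega
      rw [hm2] at hsq
      exact hsq

-- A's loop computes the reduced composition of the accumulator with the m-th power (m > 0)
theorem mappingLoopA_eq (mod : Int) (m : Nat) (hm : m ≠ 0) (idv f : List Int) :
    mappingLoopA idv f mod m = rmodL mod (affComp (tpL idv) (affPow (tpL f) m)) := by
  induction m using Nat.strong_induction_on generalizing idv f with
  | _ m ih =>
  rw [mappingLoopA, if_neg hm]
  by_cases h2 : m / 2 = 0
  · have hm1 : m = 1 := by omega
    subst hm1
    rw [mappingLoopA]
    simp [rmodL, affPow, affComp, tpL, PySem.Int.mod]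
  · have hlt : m / 2 < m := Nat.div_lt_self (Nat.pos_of_ne_zero hm) (by omega)
    have hsq : PEq mod (affPow (tpL [PySem.Int.mod ((f.getD 0 0) * (f.getD 0 0)) mod,
        PySem.Int.mod ((f.getD 0 0) * (f.getD 1 0) + (f.getD 1 0)) mod]) (m / 2))
        (affPow (tpL f) (2 * (m / 2))) := by
      rw [tpL_sq, ← affPow_sq]
      exact affPow_congr (PEq.rmod_self mod _) (m / 2)
    by_cases hodd : m % 2 = 1
    · rw [if_pos hodd, ih (m / 2) hlt h2, step_list]
      apply rmodL_congr
      rw [tpL_rmodL]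
      have hc := PEq.comp (PEq.rmod_self mod (affComp (tpL idv) (tpL f))) hsq
      have hpow : affComp (affComp (tpL idv) (tpL f)) (affPow (tpL f) (2 * (m / 2)))
          = affComp (tpL idv) (affPow (tpL f) m) := by
        have h : m = 2 * (m / 2) + 1 := by omega
        rw [affComp_assoc, affComp_affPow, ← h]
      rw [← hpow]; exact hc
    · rw [if_neg hodd, ih (m / 2) hlt h2]
      apply rmodL_congr
      have hm2 : 2 * (m / 2) = m := by omega
      rw [hm2] at hsq
      exact PEq.comp (PEq.refl mod (tpL idv)) hsq

theorem affComp_one (p : Int × Int) : affComp (1, 0) p = p := by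
  simp [affComp]

-- ===== VERDICT (by name: the statement is the Claim_ definition above) =====
theorem mapping_pow_spec : Claim_equal_mapping_pow := by
  intro f m mod _ _
  unfold Spec_mapping_pow mapping_pow mapping_pow_alt
  by_cases h : m.toNat = 0
  · rw [h, mappingLoopA, mappingPowB]; simp
  · rw [mappingLoopA_eq mod m.toNat h, mappingPowB_eq mod m.toNat h]
    have : tpL [1, 0] = ((1 : Int), (0 : Int)) := by simp [tpL]
    rw [this, affComp_one]
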